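-- pv_equiv track=rewrite | github.com/Hermi-git/Comptitive_programming | 04-Jul-2025/Rearrange Array Elements by Sign 373431.py | rearrangeArray
-- ===== SOURCE A (Python) =====
-- from typing import List
--
-- def rearrangeArray(nums: List[int]) -> List[int]:
--     neg = [num for num in nums if num <0 ]
--     pos = [num for num in nums if num > 0]
--
--     n = p =0
--     ans = []
--     while n < len(neg) and p < len(pos):
--         ans.append(pos[p])
--         ans.append(neg[n])
--         p+=1
--         n+=1
--     return ans
-- ===== SOURCE B (Python) =====
-- def rearrangeArray(nums):
--     npos = sum(1 for x in nums if x > 0)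
--     nneg = sum(1 for x in nums if x < 0)
--     m = 2 * min(npos, nneg)
--     ans = [0] * m
--     pi, ni = 0, 1
--     for x in nums:
--         if x > 0:
--             if pi < m:
--                 ans[pi] = x
--                 pi += 2
--         elif x < 0:
--             if ni < m:
--                 ans[ni] = x
--                 ni += 2
--     return ans
-- ===== Notes on version B (the rewrite author's own statement) =====
-- stated objective: alternative
-- what changed: Replaces A's two filtered intermediate lists plus an index-merge loop with counting in one pass, preallocating the output of length 2*min(npos,nneg), and filling it in a single pass over nums via two strided cursors (even positions for positives, odd for negatives).
import Mathlib
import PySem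

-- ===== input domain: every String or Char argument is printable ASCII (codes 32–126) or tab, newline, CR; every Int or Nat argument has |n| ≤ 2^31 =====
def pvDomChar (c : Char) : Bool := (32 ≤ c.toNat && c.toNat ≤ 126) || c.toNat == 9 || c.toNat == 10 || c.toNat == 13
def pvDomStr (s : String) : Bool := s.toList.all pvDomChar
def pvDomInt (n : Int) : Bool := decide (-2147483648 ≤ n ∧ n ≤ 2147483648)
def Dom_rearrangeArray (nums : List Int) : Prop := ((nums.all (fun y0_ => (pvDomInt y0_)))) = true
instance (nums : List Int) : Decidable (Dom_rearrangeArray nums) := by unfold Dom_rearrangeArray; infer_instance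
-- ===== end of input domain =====

-- B replaces A's two filtered lists + merge loop with a preallocated output filled in one pass by two strided cursors; alternative decomposition, same asymptotic cost.

-- ===== PORT A =====
-- A's while loop: indices p into pos and n into neg, appending pos[p], neg[n] each round.
def pvALoop (pos neg : List Int) (p n : Nat) (ans : List Int) : List Int :=
  if h : n < neg.length ∧ p < pos.length then
    pvALoop pos neg (p + 1) (n + 1) (ans ++ [pos[p]'h.2, neg[n]'h.1])
  else ans
termination_by neg.length - n

def rearrangeArray (nums : List Int) : List Int :=
  let neg := nums.filter (fun num => num < 0)
  let pos := nums.filter (fun num => num > 0)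
  pvALoop pos neg 0 0 []

-- ===== PORT B =====
-- one body of B's for-loop: state (ans, pi, ni)
def pvBStep (m : Nat) (st : List Int × Nat × Nat) (x : Int) : List Int × Nat × Nat :=
  let (ans, pi, ni) := st
  if x > 0 then
    if pi < m then (ans.set pi x, pi + 2, ni) else st
  else if x < 0 then
    if ni < m then (ans.set ni x, pi, ni + 2) else st
  else st

def rearrangeArray_alt (nums : List Int) : List Int :=
  let npos := nums.countP (fun x => decide (x > 0))
  let nneg := nums.countP (fun x => decide (x < 0))
  let m := 2 * min npos nneg
  let res := nums.foldl (pvBStep m) (List.replicate m 0, 0, 1)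
  res.1

-- ===== PRECONDITION & SPEC =====
def Spec_rearrangeArray (nums : List Int) (out : List Int) : Prop := out = rearrangeArray_alt nums
instance (nums : List Int) (out : List Int) : Decidable (Spec_rearrangeArray nums out) := by unfold Spec_rearrangeArray; infer_instance

-- ===== CLAIM (what is proved, stated in full; the proofs are below) =====
def Claim_equal_rearrangeArray : Prop := ∀ (nums : List Int), Dom_rearrangeArray nums → Spec_rearrangeArray nums (rearrangeArray nums)


-- ===== LEMMAS AND PROOFS =====

def pvItl : List Int → List Int → List Int
  | p :: ps, q :: qs => p :: q :: pvItl ps qs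
  | _, _ => []
theorem pvItl_nil_right (u : List Int) : pvItl u [] = [] := by cases u <;> rfl



theorem pvALoop_eq (pos neg : List Int) :
    ∀ p n ans, pvALoop pos neg p n ans = ans ++ pvItl (pos.drop p) (neg.drop n) := by
  intro p n ans
  fun_induction pvALoop pos neg p n ans with
  | case1 p n ans h ih =>
    rw [ih, List.drop_eq_getElem_cons h.2, List.drop_eq_getElem_cons h.1, pvItl]
    simp
  | case2 p n ans h =>
    rcases Nat.lt_or_ge n neg.length with hn | hn
    · have hp : pos.length ≤ p := by omega
      simp [List.drop_eq_nil_of_le hp, pvItl]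
    · simp [List.drop_eq_nil_of_le hn, pvItl_nil_right]

theorem pvItl_take (u : List Int) : ∀ (v : List Int) (k : Nat), min u.length v.length ≤ k →
    pvItl (u.take k) (v.take k) = pvItl u v := by
  induction u with
  | nil => intro v k h; simp [pvItl]
  | cons a as ih =>
    intro v k h
    cases v with
    | nil => simp [pvItl_nil_right, pvItl]
    | cons b bs =>
      cases k with
      | zero => simp at h
      | succ k' =>
        simp only [List.take_succ_cons, pvItl]
        rw [ih bs k' (by simp at h; omega)]

theorem pvSet_itl_even (u : List Int) : ∀ (v : List Int) (i : Nat) (x : Int),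
    u.length = v.length → i < u.length →
    (pvItl u v).set (2 * i) x = pvItl (u.set i x) v := by
  induction u with
  | nil => intro v i x hl hi; simp at hi
  | cons a as ih =>
    intro v i x hl hi
    cases v with
    | nil => simp at hl
    | cons b bs =>
      cases i with
      | zero => simp [pvItl]
      | succ i' =>
        have h2 : 2 * (i' + 1) = (2 * i') + 1 + 1 := by ring
        simp only [pvItl, h2, List.set_cons_succ]
        rw [ih bs i' x (by simpa using hl) (by simpa using hi)]

theorem pvSet_itl_odd (u : List Int) : ∀ (v : List Int) (i : Nat) (x : Int),
    u.length = v.length → i < v.length →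
    (pvItl u v).set (2 * i + 1) x = pvItl u (v.set i x) := by
  induction u with
  | nil => intro v i x hl hi; rw [← hl] at hi; simp at hi
  | cons a as ih =>
    intro v i x hl hi
    cases v with
    | nil => simp at hi
    | cons b bs =>
      cases i with
      | zero => simp [pvItl]
      | succ i' =>
        have h2 : 2 * (i' + 1) + 1 = (2 * i' + 1) + 1 + 1 := by ring
        simp only [pvItl, h2, List.set_cons_succ]
        rw [ih bs i' x (by simpa using hl) (by simpa using hi)]

theorem pvItl_replicate (k : Nat) :
    pvItl (List.replicate k (0:Int)) (List.replicate k 0) = List.replicate (2 * k) 0 := by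
  induction k with
  | zero => rfl
  | succ k' ih =>
    have : 2 * (k' + 1) = 2 * k' + 1 + 1 := by ring
    simp only [List.replicate_succ, pvItl, ih, this]

theorem pvB_run (k : Nat) (t : List Int) : ∀ (P N : List Int),
    k ≤ P.length + (t.filter (fun y => decide (y > 0))).length →
    k ≤ N.length + (t.filter (fun y => decide (y < 0))).length →
    (t.foldl (pvBStep (2*k))
       (pvItl (P.take (min P.length k) ++ List.replicate (k - min P.length k) 0)
              (N.take (min N.length k) ++ List.replicate (k - min N.length k) 0),
        2 * min P.length k, 2 * min N.length k + 1)).1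
    = pvItl ((P ++ t.filter (fun y => decide (y > 0))).take k)
            ((N ++ t.filter (fun y => decide (y < 0))).take k) := by
  induction t with
  | nil =>
    intro P N h1 h2
    simp only [List.filter_nil, List.length_nil, Nat.add_zero] at h1 h2
    simp [Nat.min_eq_right h1, Nat.min_eq_right h2]
  | cons x t ih =>
    intro P N h1 h2
    by_cases hx : x > 0
    · have hxn : ¬ (x < 0) := by omega
      have fp : List.filter (fun y => decide (y > 0)) (x :: t)
          = x :: List.filter (fun y => decide (y > 0)) t := by simp [hx]
      have fn : List.filter (fun y => decide (y < 0)) (x :: t)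
          = List.filter (fun y => decide (y < 0)) t := by simp [hxn]
      rw [fp, List.length_cons] at h1
      rw [fn] at h2
      rw [List.foldl_cons, fp, fn]
      by_cases hPk : P.length < k
      · have hmin : min P.length k = P.length := Nat.min_eq_left (Nat.le_of_lt hPk)
        rw [hmin]
        have hgo : 2 * P.length < 2 * k := by omega
        simp only [pvBStep, hx, if_true, hgo]
        rw [pvSet_itl_even _ _ _ _ (by simp; omega) (by simp; omega)]
        rw [List.take_length, List.set_append_right _ _ (le_refl _), Nat.sub_self]
        have hrep : k - P.length = (k - (P.length + 1)) + 1 := by omega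
        rw [hrep, List.replicate_succ, List.set_cons_zero]
        have key := ih (P ++ [x]) N (by simp only [List.length_append, List.length_cons, List.length_nil]; omega) h2
        have hm' : min (P ++ [x]).length k = P.length + 1 := by simp; omega
        rw [hm'] at key
        have ht' : (P ++ [x]).take (P.length + 1) = P ++ [x] :=
          List.take_of_length_le (by simp)
        rw [ht'] at key
        simp only [List.append_assoc, List.singleton_append] at key ⊢
        exact key
      · have hmin : min P.length k = k := Nat.min_eq_right (by omega)
        rw [hmin]
        have hgo : ¬ (2 * k < 2 * k) := by omega
        simp only [pvBStep, hx, if_true, hgo, if_false]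
        have key := ih (P ++ [x]) N (by simp only [List.length_append, List.length_cons, List.length_nil]; omega) h2
        have hm' : min (P ++ [x]).length k = k := by simp; omega
        rw [hm'] at key
        have ht' : (P ++ [x]).take k = P.take k := List.take_append_of_le_length (by omega)
        rw [ht'] at key
        simp only [List.append_assoc, List.singleton_append] at key
        exact key
    · by_cases hxn : x < 0
      · have fp : List.filter (fun y => decide (y > 0)) (x :: t)
            = List.filter (fun y => decide (y > 0)) t := by simp [hx]
        have fn : List.filter (fun y => decide (y < 0)) (x :: t)
            = x :: List.filter (fun y => decide (y < 0)) t := by simp [hxn]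
        rw [fp] at h1
        rw [fn, List.length_cons] at h2
        rw [List.foldl_cons, fp, fn]
        by_cases hNk : N.length < k
        · have hmin : min N.length k = N.length := Nat.min_eq_left (Nat.le_of_lt hNk)
          rw [hmin]
          have hgo : 2 * N.length + 1 < 2 * k := by omega
          simp only [pvBStep, hx, if_false, hxn, if_true, hgo]
          rw [pvSet_itl_odd _ _ _ _ (by simp; omega) (by simp; omega)]
          rw [List.take_length, List.set_append_right _ _ (le_refl _), Nat.sub_self]
          have hrep : k - N.length = (k - (N.length + 1)) + 1 := by omega
          rw [hrep, List.replicate_succ, List.set_cons_zero]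
          have key := ih P (N ++ [x]) h1 (by simp only [List.length_append, List.length_cons, List.length_nil]; omega)
          have hm' : min (N ++ [x]).length k = N.length + 1 := by simp; omega
          rw [hm'] at key
          have ht' : (N ++ [x]).take (N.length + 1) = N ++ [x] :=
            List.take_of_length_le (by simp)
          rw [ht'] at key
          simp only [List.append_assoc, List.singleton_append] at key ⊢
          exact key
        · have hmin : min N.length k = k := Nat.min_eq_right (by omega)
          rw [hmin]
          have hgo : ¬ (2 * k + 1 < 2 * k) := by omega
          simp only [pvBStep, hx, if_false, hxn, if_true, hgo]
          have key := ih P (N ++ [x]) h1 (by simp only [List.length_append, List.length_cons, List.length_nil]; omega)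
          have hm' : min (N ++ [x]).length k = k := by simp; omega
          rw [hm'] at key
          have ht' : (N ++ [x]).take k = N.take k := List.take_append_of_le_length (by omega)
          rw [ht'] at key
          simp only [List.append_assoc, List.singleton_append] at key
          exact key
      · have fp : List.filter (fun y => decide (y > 0)) (x :: t)
            = List.filter (fun y => decide (y > 0)) t := by simp [hx]
        have fn : List.filter (fun y => decide (y < 0)) (x :: t)
            = List.filter (fun y => decide (y < 0)) t := by simp [hxn]
        rw [fp] at h1; rw [fn] at h2
        rw [List.foldl_cons, fp, fn]
        simp only [pvBStep, hx, hxn, if_false]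
        exact ih P N h1 h2

-- ===== VERDICT (by name: the statement is the Claim_ definition above) =====
theorem rearrangeArray_spec : Claim_equal_rearrangeArray := by
  intro nums _
  show rearrangeArray nums = rearrangeArray_alt nums
  rw [rearrangeArray, rearrangeArray_alt]
  have hc1 : nums.countP (fun x => decide (x > 0)) = (nums.filter (fun x => decide (x > 0))).length := by
    rw [List.countP_eq_length_filter]
  have hc2 : nums.countP (fun x => decide (x < 0)) = (nums.filter (fun x => decide (x < 0))).length := by
    rw [List.countP_eq_length_filter]
  simp only [hc1, hc2]
  set pos := nums.filter (fun x => decide (x > 0)) with hpos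
  set neg := nums.filter (fun x => decide (x < 0)) with hneg
  set k := min pos.length neg.length with hk
  have hA := pvALoop_eq pos neg 0 0 []
  simp only [List.drop_zero, List.nil_append] at hA
  have hB := pvB_run k nums [] []
    (by simp only [List.length_nil, ← hpos]; omega)
    (by simp only [List.length_nil, ← hneg]; omega)
  rw [← hpos, ← hneg] at hB
  simp only [List.length_nil, Nat.zero_min, List.take_nil, Nat.sub_zero,
    List.nil_append, Nat.mul_zero, pvItl_replicate] at hB
  rw [hA, hB, pvItl_take pos neg k (le_of_eq hk.symm)]
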